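-- pv_equiv track=rewrite | github.com/rst1357/crypto-23-24 | cp3/Orlov_Dmytro_FB-14_Makuha_Andrew_FB-14/main.py | bigram_frequency
-- ===== SOURCE A (Python) =====
-- def bigram_frequency(text):
--     dictionary = {}
--     array = []
--
--     for i in range(0, len(text), 2):
--         bigram = text[i : i + 2]
--         if len(bigram) == 2:
--             array.append(bigram)
--
--     for i in array:
--         if i in dictionary:
--             dictionary[i] += 1
--         else:
--             dictionary[i] = 1
--
--     sorted_dictionary = sorted(dictionary.items(), key=lambda x: x[1], reverse=True)
--     sorted_dictionary = dict(sorted_dictionary)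
--
--     return sorted_dictionary.keys()
-- ===== SOURCE B (Python) =====
-- def bigram_frequency(text):
--     counts = {}
--     for i in range(0, len(text), 2):
--         bg = text[i : i + 2]
--         if len(bg) == 2:
--             counts[bg] = counts.get(bg, 0) + 1
--
--     out = []
--     for c in range(max(counts.values(), default=0), 0, -1):
--         for k, v in counts.items():
--             if v == c:
--                 out.append(k)
--     return dict.fromkeys(out).keys()
-- ===== Notes on version B (the rewrite author's own statement) =====
-- stated objective: alternative
-- what changed: B fuses A's bigram-collecting and counting loops into one counting pass and replaces the comparison sort of the items by a counting-sort-style emission: iterate the count value from the maximum down to 1 and emit, in insertion order, the bigrams with that count.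
import Mathlib
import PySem

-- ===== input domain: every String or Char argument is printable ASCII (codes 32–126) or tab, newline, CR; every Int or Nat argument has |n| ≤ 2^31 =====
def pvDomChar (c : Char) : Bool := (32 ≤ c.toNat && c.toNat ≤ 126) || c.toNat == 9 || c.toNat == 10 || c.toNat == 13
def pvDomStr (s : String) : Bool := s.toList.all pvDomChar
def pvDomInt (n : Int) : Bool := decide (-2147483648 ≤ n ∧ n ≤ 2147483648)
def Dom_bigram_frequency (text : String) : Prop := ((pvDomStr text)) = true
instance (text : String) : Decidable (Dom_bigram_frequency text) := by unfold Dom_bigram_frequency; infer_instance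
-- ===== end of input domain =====

-- B fuses A's collect-then-count loops into one counting pass and replaces the stable sort by
-- counting-sort-style emission (iterate the count from its maximum down to 1); alternative, not faster.

-- ===== PORT A =====
def bigram_frequency (text : String) : List String :=
  let array := (PySem.List.pyRange 0 (PySem.Str.len text) 2).foldl
    (fun arr i =>
      let bigram := PySem.Str.slice text (some i) (some (i + 2))
      if PySem.Str.len bigram == 2 then arr ++ [bigram] else arr) []
  let dictionary := array.foldl
    (fun d i => if d.contains i then d.insert i (d.getD i 0 + 1) else d.insert i 1)
    (PySem.Dict.empty : PySem.Dict String Int)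
  let sorted_dictionary := PySem.List.sorted dictionary.items (fun x => x.2) true
  (PySem.Dict.ofList sorted_dictionary).keys

-- ===== PORT B =====
def bigram_frequency_alt (text : String) : List String :=
  let counts := (PySem.List.pyRange 0 (PySem.Str.len text) 2).foldl
    (fun d i =>
      let bg := PySem.Str.slice text (some i) (some (i + 2))
      if PySem.Str.len bg == 2 then d.insert bg (d.getD bg 0 + 1) else d)
    (PySem.Dict.empty : PySem.Dict String Int)
  let out := (PySem.List.pyRange (PySem.List.maxD counts.values (fun v => v) 0) 0 (-1)).foldl
    (fun acc c => counts.items.foldl (fun acc kv => if kv.2 == c then acc ++ [kv.1] else acc) acc)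
    []
  PySem.List.dedup out

-- ===== PRECONDITION & SPEC =====
def Spec_bigram_frequency (text : String) (out : List String) : Prop := out = bigram_frequency_alt text
instance (text : String) (out : List String) : Decidable (Spec_bigram_frequency text out) := by unfold Spec_bigram_frequency; infer_instance

-- ===== CLAIM (what is proved, stated in full; the proofs are below) =====
def Claim_equal_bigram_frequency : Prop := ∀ (text : String), Dom_bigram_frequency text → Spec_bigram_frequency text (bigram_frequency text)

-- ===== LEMMAS AND PROOFS =====

-- the list of non-overlapping length-2 bigrams both programs count
def pvBgs (text : String) : List String :=
  ((PySem.List.pyRange 0 (PySem.Str.len text) 2).filter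
      (fun i => PySem.Str.len (PySem.Str.slice text (some i) (some (i + 2))) == 2)).map
    (fun i => PySem.Str.slice text (some i) (some (i + 2)))

def pvCnt (text : String) : PySem.Dict String Int := PySem.Dict.counter (pvBgs text)

def pvCs (text : String) : List Int :=
  PySem.List.pyRange (PySem.List.maxD (pvCnt text).values (fun v => v) 0) 0 (-1)

def pvSorted (text : String) : List (String × Int) :=
  PySem.List.sorted (pvCnt text).items (fun q => q.2) true

-- inserting x into ys ++ zs passes over the block ys it is not to be placed before
lemma insertBy_not_before_append {α : Type} (bef : α → α → Bool) (x : α) (ys zs : List α)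
    (h : ∀ y ∈ ys, bef x y = false) :
    PySem.List.insertBy bef x (ys ++ zs) = ys ++ PySem.List.insertBy bef x zs := by
  induction ys with
  | nil => simp
  | cons y ys ih =>
    have hy : bef x y = false := h y (by simp)
    simp [PySem.List.insertBy, hy, ih (fun y hy => h y (by simp [hy]))]

-- inserting x in front of a block it must precede entirely
lemma insertBy_all_before {α : Type} (bef : α → α → Bool) (x : α) (zs : List α)
    (h : ∀ z ∈ zs, bef x z = true) :
    PySem.List.insertBy bef x zs = x :: zs := by
  cases zs with
  | nil => rfl
  | cons z t => simp [PySem.List.insertBy, h z (by simp)]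

-- stable reverse insertion into a list grouped by strictly decreasing key values
lemma insert_grouped {α : Type} (key : α → Int) (x : α) (cs : List Int) (g : Int → List α)
    (hg : ∀ c ∈ cs, ∀ p ∈ g c, key p = c)
    (hdec : cs.Pairwise (fun a b => b < a))
    (hmem : key x ∈ cs) :
    PySem.List.insertBy (fun a b => decide (key b < key a)) x (cs.flatMap g) =
      cs.flatMap (fun c => g c ++ if key x = c then [x] else []) := by
  induction cs with
  | nil => simp at hmem
  | cons c cs ih =>
    rw [List.flatMap_cons, List.flatMap_cons]
    rcases List.pairwise_cons.mp hdec with ⟨hlt, hdec'⟩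
    by_cases hx : key x = c
    · have h1 : ∀ y ∈ g c, (decide (key y < key x) : Bool) = false := by
        intro y hy
        simp [hg c (by simp) y hy, hx]
      rw [insertBy_not_before_append _ _ _ _ h1]
      have h2 : ∀ z ∈ cs.flatMap g, (decide (key z < key x) : Bool) = true := by
        intro z hz
        rcases List.mem_flatMap.mp hz with ⟨c', hc', hzc'⟩
        have hz' := hg c' (by simp [hc']) z hzc'
        have := hlt c' hc'
        simp [hz', hx]
        omega
      rw [insertBy_all_before _ _ _ h2]
      have h3 : cs.flatMap (fun c' => g c' ++ if key x = c' then [x] else []) = cs.flatMap g := by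
        apply List.flatMap_congr
        intro c' hc'
        have : key x ≠ c' := by have := hlt c' hc'; omega
        simp [this]
      rw [h3, if_pos hx]
      simp
    · have hmem' : key x ∈ cs := by
        rcases List.mem_cons.mp hmem with h | h
        · exact absurd h hx
        · exact h
      have h1 : ∀ y ∈ g c, (decide (key y < key x) : Bool) = false := by
        intro y hy
        have hkx : key x < c := hlt _ hmem'
        simp [hg c (by simp) y hy]
        omega
      rw [insertBy_not_before_append _ _ _ _ h1,
          ih (fun c' hc' => hg c' (by simp [hc'])) hdec' hmem', if_neg hx]
      simp
-- the stable reverse sort of xs by key is the concatenation, over the strictly decreasing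
-- list cs of candidate key values, of the key-c elements of xs in their original order
lemma sorted_rev_groups {α : Type} (xs : List α) (key : α → Int) (cs : List Int)
    (hdec : cs.Pairwise (fun a b => b < a))
    (hmem : ∀ p ∈ xs, key p ∈ cs) :
    PySem.List.sorted xs key true = cs.flatMap (fun c => xs.filter (fun p => key p == c)) := by
  rw [PySem.List.sorted_rev_eq_foldl_insertBy]
  induction xs using List.reverseRecOn with
  | nil => simp
  | append_singleton ys x ih =>
    rw [List.foldl_append, List.foldl_cons, List.foldl_nil,
        ih (fun p hp => hmem p (by simp [hp]))]
    rw [insert_grouped key x cs _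
          (fun c _ p hp => by have := List.of_mem_filter hp; simpa using this)
          hdec (hmem x (by simp))]
    apply List.flatMap_congr
    intro c _
    rw [List.filter_append]
    simp only [List.filter_cons, List.filter_nil]
    by_cases h : key x = c
    · simp [h]
    · simp [h, beq_iff_eq]
-- A's counting loop step is exactly Dict.modify
lemma count_step_eq (d : PySem.Dict String Int) (i : String) :
    (if d.contains i then d.insert i (d.getD i 0 + 1) else d.insert i 1) =
      d.modify i 0 (· + 1) := by
  by_cases h : d.contains i = true
  · simp [h, PySem.Dict.modify]
  · have hn : d.get? i = none := by
      have hc := PySem.Dict.contains_eq_isSome_get? d i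
      rw [eq_false_of_ne_true h] at hc
      cases hg : d.get? i
      · rfl
      · rw [hg] at hc; simp at hc
    simp [h, PySem.Dict.modify, PySem.Dict.getD, hn]

-- the keys of the sorted items are pairwise distinct
lemma pvNodup (text : String) : ((pvSorted text).map Prod.fst).Nodup := by
  have hperm : ((pvSorted text).map Prod.fst).Perm ((pvCnt text).items.map Prod.fst) :=
    (PySem.List.sorted_perm (pvCnt text).items (fun q => q.2) true).map _
  apply hperm.nodup_iff.mpr
  rw [pvCnt, PySem.Dict.items_counter, List.map_map]
  exact (PySem.Set.nodup_ofList (pvBgs text)).map (by intro a b h; simpa using h)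

-- A's output is the first components of the stably reverse-sorted counter items
lemma A_eq (text : String) : bigram_frequency text = (pvSorted text).map Prod.fst := by
  simp only [bigram_frequency, PySem.List.foldl_append_if, List.nil_append]
  rw [PySem.List.foldl_congr_mem _ _ (fun d x => d.modify x 0 (· + 1)) _
        (fun acc x _ => count_step_eq acc x),
      ← PySem.Dict.counter_eq_foldl]
  have hnd := pvNodup text
  unfold pvSorted pvCnt pvBgs at hnd ⊢
  rw [PySem.Dict.ofList, PySem.Dict.update, PySem.Dict.keys,
      PySem.Dict.items_foldl_insert_fresh _ Prod.fst Prod.snd PySem.Dict.empty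
        (fun a _ => PySem.Dict.contains_empty a.1) hnd]
  simp [PySem.Dict.empty]

-- every stored count lies in pvCs text = [max, max-1, …, 1]
lemma pvMemCs (text : String) : ∀ q ∈ (pvCnt text).items, q.2 ∈ pvCs text := by
  intro q hq
  rw [pvCs, PySem.List.mem_pyRange_neg_one]
  have hv : q.2 ∈ (pvCnt text).values := by
    rw [PySem.Dict.values]; exact List.mem_map.mpr ⟨q, hq, rfl⟩
  constructor
  · rw [pvCnt, PySem.Dict.items_counter] at hq
    rcases List.mem_map.mp hq with ⟨k, hk, hqk⟩
    have hkb : k ∈ pvBgs text := (PySem.Set.mem_ofList (pvBgs text) k).mp hk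
    have hpos : 0 < List.count k (pvBgs text) := List.count_pos_iff.mpr hkb
    rw [← hqk]
    simpa using hpos
  · rw [PySem.List.maxD]
    cases hmx : PySem.List.max? (pvCnt text).values (fun v => v) with
    | none => rw [PySem.List.max?_eq_none_iff] at hmx; rw [hmx] at hv; simp at hv
    | some mv => simpa using PySem.List.max?_isMax hmx q.2 hv

-- the candidate count values are strictly decreasing
lemma pvCsDec (text : String) : (pvCs text).Pairwise (fun a b => b < a) := by
  rw [pvCs, PySem.List.pyRange_neg_one, List.pairwise_map]
  exact List.pairwise_lt_range.imp (by intro a b h; omega)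

-- B's output is the first components of the descending-count bucket emission
set_option maxHeartbeats 1000000 in
lemma B_eq (text : String) :
    bigram_frequency_alt text =
      PySem.List.dedup
        (((pvCs text).flatMap (fun c => (pvCnt text).items.filter (fun q => q.2 == c))).map
          Prod.fst) := by
  simp only [bigram_frequency_alt]
  have hcnt : (PySem.List.pyRange 0 (PySem.Str.len text) 2).foldl
      (fun d i =>
        if PySem.Str.len (PySem.Str.slice text (some i) (some (i + 2))) == 2 then
          d.insert (PySem.Str.slice text (some i) (some (i + 2)))
            (d.getD (PySem.Str.slice text (some i) (some (i + 2))) 0 + 1)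
        else d)
      (PySem.Dict.empty : PySem.Dict String Int) = pvCnt text := by
    rw [PySem.List.foldl_if_eq_foldl_filter, pvCnt, PySem.Dict.counter_eq_foldl, pvBgs,
        List.foldl_map]
    rfl
  rw [hcnt]
  congr 1
  have hcs : PySem.List.pyRange (PySem.List.maxD (pvCnt text).values (fun v => v) 0) 0 (-1) =
      pvCs text := rfl
  rw [hcs]
  have s1 : (pvCs text).foldl
      (fun acc c =>
        (pvCnt text).items.foldl (fun acc kv => if kv.2 == c then acc ++ [kv.1] else acc) acc) [] =
      (pvCs text).foldl
        (fun acc c => acc ++ ((pvCnt text).items.filter (fun q => q.2 == c)).map Prod.fst) [] :=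
    PySem.List.foldl_congr_mem _ _ _ []
      (fun acc c _ =>
        PySem.List.foldl_append_if (fun kv => kv.2 == c) Prod.fst (pvCnt text).items acc)
  have s2 : (pvCs text).foldl
      (fun acc c => acc ++ ((pvCnt text).items.filter (fun q => q.2 == c)).map Prod.fst) [] =
      (pvCs text).flatMap (fun c => ((pvCnt text).items.filter (fun q => q.2 == c)).map Prod.fst) := by
    rw [PySem.List.foldl_append_eq_flatMap, List.nil_append]
  rw [s1, s2, List.map_flatMap]

-- ===== VERDICT (by name: the statement is the Claim_ definition above) =====
theorem bigram_frequency_spec : Claim_equal_bigram_frequency := by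
  intro text _
  unfold Spec_bigram_frequency
  rw [A_eq, B_eq]
  have hkey : pvSorted text =
      (pvCs text).flatMap (fun c => (pvCnt text).items.filter (fun q => q.2 == c)) :=
    sorted_rev_groups (pvCnt text).items (fun q => q.2) (pvCs text) (pvCsDec text) (pvMemCs text)
  rw [← hkey, PySem.List.dedup_eq_ofList, PySem.Set.ofList_eq_self_of_nodup _ (pvNodup text)]
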